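-- pv_equiv track=rewrite | github.com/GuyHacohen/curriculum_learning | test_script.py | params_from_string
-- ===== SOURCE A (Python) =====
-- def params_from_string(string):
--     res = []
--     record = False
--     param = ""
--     for idx, c in enumerate(string):
--         if c == "}" and record:
--             record = False
--             res.append(param)
--             param = ""
--         if record:
--             param += c
--         if idx >= 1:
--             if c == "{" and string[idx - 1] == "$":
--                 record = True
--
--     return res
-- ===== SOURCE B (Python) =====
-- def params_from_string(string):
--     res = []
--     i = 0
--     while True:
--         start = string.find("${", i)
--         if start == -1:
--             break
--         end = string.find("}", start + 2)
--         if end == -1: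
--             break
--         res.append(string[start + 2:end])
--         i = end + 1
--     return res
-- ===== Notes on version B (the rewrite author's own statement) =====
-- stated objective: faster
-- what changed: Replaced the per-character recording state machine (record flag, param accumulator, previous-char lookup) by a marker-search loop: repeatedly str.find the opening dollar-brace marker, then str.find the first following closing brace, append the slice between them, and resume right after the closer.
import Mathlib
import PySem

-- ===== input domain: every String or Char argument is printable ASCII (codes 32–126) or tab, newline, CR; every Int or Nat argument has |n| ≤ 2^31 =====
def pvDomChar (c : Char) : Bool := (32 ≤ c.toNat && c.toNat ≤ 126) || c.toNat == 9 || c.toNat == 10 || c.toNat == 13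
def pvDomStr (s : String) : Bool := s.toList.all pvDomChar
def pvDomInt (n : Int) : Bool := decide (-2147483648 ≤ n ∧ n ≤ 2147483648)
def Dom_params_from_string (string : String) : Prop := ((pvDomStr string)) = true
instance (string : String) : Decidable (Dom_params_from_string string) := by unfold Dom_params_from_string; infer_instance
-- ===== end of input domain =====

-- B replaces A's per-character recording state machine by a marker-search loop
-- (str.find the opening marker, then the first following closing brace, capture the
-- slice between them, resume after the closer); measurably faster (C-level find vs a
-- per-character Python loop). Proven equal to A on every string.

-- ===== PORT A =====
-- one iteration of A's for-loop body; `string` is A's parameter, consulted as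
-- string[idx-1] (always in range there since idx >= 1, so pyGet? never yields none)
def pvStepA (string : String) (st : List String × Bool × List Char)
    (ic : Int × Char) : List String × Bool × List Char :=
  let res := st.1
  let record := st.2.1
  let param := st.2.2
  let idx := ic.1
  let c := ic.2
  let res' := if c = '}' ∧ record = true then res ++ [String.ofList param] else res
  let record' := if c = '}' ∧ record = true then false else record
  let param' := if c = '}' ∧ record = true then ([] : List Char) else param
  let param'' := if record' = true then param' ++ [c] else param'
  let record'' :=
    if 1 ≤ idx then
      if c = '{' ∧ PySem.Str.pyGet? string (idx - 1) = some '$' then true else record'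
    else record'
  (res', record'', param'')

def params_from_string (string : String) : List String :=
  ((PySem.List.enumerate string.toList 0).foldl (pvStepA string) ([], false, [])).1

-- ===== PORT B =====
-- B's while-True loop; fuel only bounds the iteration count (i strictly grows each
-- round, so length+1 rounds always suffice) — it never changes the computed value
def pvLoopB (string : String) : Nat → Int → List String → List String
  | 0, _, res => res
  | fuel + 1, i, res =>
    let start := PySem.Str.findFrom string "${" i
    if start = -1 then res
    else
      let e := PySem.Str.findFrom string "}" (start + 2)
      if e = -1 then res
      else pvLoopB string fuel (e + 1)
        (res ++ [PySem.Str.slice string (some (start + 2)) (some e)])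

def params_from_string_alt (string : String) : List String :=
  pvLoopB string (string.toList.length + 1) 0 []

-- ===== PRECONDITION & SPEC =====
def Spec_params_from_string (string : String) (out : List String) : Prop := out = params_from_string_alt string
instance (string : String) (out : List String) : Decidable (Spec_params_from_string string out) := by unfold Spec_params_from_string; infer_instance

-- ===== CLAIM (what is proved, stated in full; the proofs are below) =====
def Claim_equal_params_from_string : Prop := ∀ (string : String), Dom_params_from_string string → Spec_params_from_string string (params_from_string string)

-- ===== LEMMAS AND PROOFS =====

-- common specification both ports are reduced to: pvScan walks the characters with a
-- "previous char was '$'" flag; pvGrab records a parameter until the first '}'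
mutual
def pvScan : Bool → List Char → List String
  | _, [] => []
  | d, c :: r => if d = true ∧ c = '{' then pvGrab r [] else pvScan (decide (c = '$')) r
def pvGrab : List Char → List Char → List String
  | [], _ => []
  | c :: r, acc =>
    if c = '}' then String.ofList acc :: pvScan false r else pvGrab r (acc ++ [c])
end

theorem pv_singleton_prefix {a : Char} {l : List Char} :
    [a] <+: l ↔ l.head? = some a := by
  cases l with
  | nil => simp
  | cons b t =>
    constructor
    · rintro ⟨u, hu⟩
      simp only [List.singleton_append] at hu
      cases hu; simp
    · intro h
      simp only [List.head?_cons, Option.some.injEq] at h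
      exact ⟨t, by simp [h]⟩

theorem pv_grab_no_close : ∀ (l acc : List Char), '}' ∉ l → pvGrab l acc = [] := by
  intro l
  induction l with
  | nil => intro acc _; simp [pvGrab]
  | cons c r ih =>
    intro acc h
    simp only [List.mem_cons, not_or] at h
    simp only [pvGrab, if_neg (fun hc : c = '}' => h.1 hc.symm)]
    exact ih _ h.2

theorem pv_grab_split : ∀ (m t acc : List Char), '}' ∉ m →
    pvGrab (m ++ '}' :: t) acc = String.ofList (acc ++ m) :: pvScan false t := by
  intro m
  induction m with
  | nil => intro t acc _; simp [pvGrab]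
  | cons c r ih =>
    intro t acc h
    simp only [List.mem_cons, not_or] at h
    simp only [List.cons_append, pvGrab, if_neg (fun hc : c = '}' => h.1 hc.symm)]
    rw [ih _ _ h.2]
    simp

theorem pv_scan_skip : ∀ (u rest : List Char) (d : Bool),
    (∀ j, j < u.length → ¬ (['$','{'] <+: (u ++ rest).drop j)) →
    (d = true → (u ++ rest).head? ≠ some '{') →
    pvScan d (u ++ rest)
      = pvScan (match u.getLast? with | some c => decide (c = '$') | none => d) rest := by
  intro u
  induction u with
  | nil => intro rest d _ _; simp
  | cons c r ih =>
    intro rest d hno hd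
    have hnotc : ¬ (d = true ∧ c = '{') := by
      rintro ⟨hdt, rfl⟩
      exact hd hdt (by simp)
    simp only [List.cons_append, pvScan, if_neg hnotc]
    have hno' : ∀ j, j < r.length → ¬ (['$','{'] <+: (r ++ rest).drop j) := by
      intro j hj
      have := hno (j + 1) (by simpa using Nat.succ_lt_succ hj)
      simpa using this
    have hd' : decide (c = '$') = true → (r ++ rest).head? ≠ some '{' := by
      intro hc hh
      have hc' : c = '$' := by simpa using hc
      have := hno 0 (by simp)
      apply this
      subst hc'
      cases hrr : r ++ rest with
      | nil => simp [hrr] at hh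
      | cons x xs =>
        rw [hrr] at hh
        simp only [List.head?_cons, Option.some.injEq] at hh
        subst hh
        simp [hrr]
    rw [ih rest (decide (c = '$')) hno' hd']
    cases r with
    | nil => simp
    | cons x xs =>
      cases hgl : (x :: xs).getLast? with
      | none => simp at hgl
      | some y => simp [hgl]

theorem pv_foldA (s : String) :
    ∀ (suf pre : List Char) (res : List String) (record : Bool) (param : List Char),
      pre ++ suf = s.toList →
      (record = false → param = []) →
      ((PySem.List.enumerate suf (pre.length : Int)).foldl (pvStepA s) (res, record, param)).1
        = if record = true then res ++ pvGrab suf param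
          else res ++ pvScan (decide (pre.getLast? = some '$')) suf := by
  intro suf
  induction suf with
  | nil =>
    intro pre res record param _ _
    cases record <;> simp [PySem.List.enumerate_nil, pvGrab, pvScan]
  | cons c r ih =>
    intro pre res record param hpre hrp
    have hprev : pre ≠ [] → PySem.List.pyGet? s.toList ((pre.length : Int) - 1) = pre.getLast? := by
      intro hne
      have h1 : 1 ≤ pre.length := List.length_pos_iff.mpr hne
      have hcast : ((pre.length : Int) - 1) = ((pre.length - 1 : Nat) : Int) := by omega
      rw [hcast, PySem.List.pyGet?_natCast, ← hpre,
        List.getElem?_append_left (by omega), List.getLast?_eq_getElem?]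
    rw [PySem.List.enumerate_cons, List.foldl_cons]
    by_cases hc : c = '}' ∧ record = true
    · -- closing brace while recording
      have hstep : pvStepA s (res, record, param) ((pre.length : Int), c)
          = (res ++ [String.ofList param], false, []) := by
        simp [pvStepA, hc.1, hc.2]
      rw [hstep]
      have := ih (pre ++ [c]) (res ++ [String.ofList param]) false [] (by simpa using hpre)
        (fun _ => rfl)
      simp only [List.length_append, List.length_singleton, Nat.cast_add, Nat.cast_one] at this ⊢
      rw [this]
      simp [hc.2, pvGrab, hc.1]
    · by_cases hrec : record = true
      · -- recording, c ≠ '}'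
        have hcne : ¬ c = '}' := fun h => hc ⟨h, hrec⟩
        have hstep : pvStepA s (res, record, param) ((pre.length : Int), c)
            = (res, true, param ++ [c]) := by
          simp [pvStepA, hrec, hcne]
        rw [hstep]
        have := ih (pre ++ [c]) res true (param ++ [c]) (by simpa using hpre) (by simp)
        simp only [List.length_append, List.length_singleton, Nat.cast_add, Nat.cast_one] at this ⊢
        rw [this]
        simp [hrec, pvGrab, hcne]
      · -- not recording
        have hrec' : record = false := by cases record <;> simp_all
        have hparam : param = [] := hrp hrec'
        subst hparam
        by_cases htr : pre ≠ [] ∧ c = '{' ∧ pre.getLast? = some '$'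
        · -- trigger fires
          obtain ⟨hpne, hcc, hlast⟩ := htr
          have hl : 1 ≤ pre.length := List.length_pos_iff.mpr hpne
          have hget : PySem.List.pyGet? s.toList ((pre.length : Int) - 1) = some '$' := by
            rw [hprev hpne]; exact hlast
          have hstep : pvStepA s (res, record, []) ((pre.length : Int), c)
              = (res, true, []) := by
            simp [pvStepA, hrec', hl, hcc, hget]
          rw [hstep]
          have := ih (pre ++ [c]) res true [] (by simpa using hpre) (by simp)
          simp only [List.length_append, List.length_singleton, Nat.cast_add, Nat.cast_one] at this ⊢
          rw [this]
          simp [hrec', pvScan, hlast, hcc]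
        · -- trigger does not fire
          have himp : 1 ≤ pre.length → c = '{' →
              ¬ PySem.List.pyGet? s.toList ((pre.length : Int) - 1) = some '$' := by
            intro h1 h2 h3
            have hpne : pre ≠ [] := by
              intro h; subst h; simp at h1
            exact htr ⟨hpne, h2, by rw [← hprev hpne]; exact h3⟩
          have hstep : pvStepA s (res, record, []) ((pre.length : Int), c)
              = (res, false, []) := by
            simp [pvStepA, hrec']
            exact himp
          rw [hstep]
          have := ih (pre ++ [c]) res false [] (by simpa using hpre) (fun _ => rfl)
          simp only [List.length_append, List.length_singleton, Nat.cast_add, Nat.cast_one] at this ⊢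
          rw [this]
          have hnd : ¬ (decide (pre.getLast? = some '$') = true ∧ c = '{') := by
            rintro ⟨hd, hcc⟩
            have hlast : pre.getLast? = some '$' := by simpa using hd
            have hpne : pre ≠ [] := by
              intro h; subst h; simp at hlast
            exact htr ⟨hpne, hcc, hlast⟩
          simp only [hrec', if_neg (by simp : ¬ (false = true)), pvScan, if_neg hnd,
            List.getLast?_concat]
          simp

theorem pv_loopB (s : String) :
    ∀ (fuel : Nat) (i : Nat) (res : List String),
      i ≤ s.toList.length → s.toList.length - i < fuel →
      pvLoopB s fuel (i : Int) res = res ++ pvScan false (s.toList.drop i) := by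
  intro fuel
  induction fuel with
  | zero => intro i res _ h; omega
  | succ fuel ih =>
    intro i res hi hfuel
    have hpat : ("${" : String).toList = ['$', '{'] := rfl
    have hpat2 : ("}" : String).toList = ['}'] := rfl
    simp only [pvLoopB, PySem.Str.findFrom_eq, hpat, hpat2]
    set cs := s.toList with hcs
    by_cases hstart : PySem.Chars.findFrom cs ['$', '{'] (i : Int) none = -1
    · rw [if_pos hstart]
      have hnoocc : ¬ (['$', '{'] <:+: cs.drop i) :=
        (PySem.Chars.findFrom_natCast_eq_neg_one_iff cs ['$', '{'] i hi).mp hstart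
      have hscan : pvScan false (cs.drop i) = [] := by
        rw [← List.append_nil (cs.drop i),
          pv_scan_skip (cs.drop i) [] false
            (fun j _ hj => hnoocc ((List.append_nil (cs.drop i) ▸ hj).isInfix.trans
              (List.drop_suffix j (cs.drop i)).isInfix))
            (fun h => absurd h (by simp))]
        cases h : (cs.drop i).getLast? <;> simp [pvScan]
      rw [hscan, List.append_nil]
    · rw [if_neg hstart]
      obtain ⟨hle, hpref, hmin⟩ :=
        PySem.Chars.findFrom_natCast_spec cs ['$', '{'] i hi hstart
      set st := PySem.Chars.findFrom cs ['$', '{'] (i : Int) none with hst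
      have h0 : (0 : Int) ≤ st := le_trans (Int.natCast_nonneg i) hle
      set n := st.toNat with hn
      have hstn : st = (n : Int) := (Int.toNat_of_nonneg h0).symm
      obtain ⟨v, hv⟩ := hpref
      have hlenv : cs.length - n = v.length + 2 := by
        have := congrArg List.length hv
        simp [List.length_drop] at this
        omega
      have hnlen : n + 2 ≤ cs.length := by
        rcases Nat.lt_or_ge n cs.length with h | h
        · omega
        · rw [List.drop_eq_nil_of_le h] at hv; simp at hv
      have hin : i ≤ n := by
        have := hle; rw [hstn] at this; exact_mod_cast this
      have hveq : cs.drop (n + 2) = v := by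
        have : (cs.drop n).drop 2 = v := by rw [← hv]; simp
        rwa [List.drop_drop] at this
      -- scanning up to the marker reaches pvGrab v []
      have hdecomp : cs.drop i = (cs.drop i).take (n - i) ++ cs.drop n := by
        conv_lhs => rw [← List.take_append_drop (n - i) (cs.drop i)]
        rw [List.drop_drop]
        congr 2
        omega
      have hulen : ((cs.drop i).take (n - i)).length = n - i := by
        simp [List.length_take, List.length_drop]
        omega
      have hscan : pvScan false (cs.drop i) = pvGrab v [] := by
        rw [hdecomp, pv_scan_skip _ _ false ?hno (fun h => absurd h (by simp))]
        · rw [← hv]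
          cases h : ((cs.drop i).take (n - i)).getLast? <;>
            simp [pvScan]
        · intro j hj hjpre
          rw [hulen] at hj
          apply hmin (i + j) (by omega) (by omega)
          rw [← hdecomp] at hjpre
          rwa [List.drop_drop] at hjpre
      have hst2 : st + 2 = ((n + 2 : Nat) : Int) := by rw [hstn]; push_cast; ring
      rw [hst2]
      by_cases he : PySem.Chars.findFrom cs ['}'] ((n + 2 : Nat) : Int) none = -1
      · rw [if_pos he]
        have hnoc : ¬ (['}'] <:+: cs.drop (n + 2)) :=
          (PySem.Chars.findFrom_natCast_eq_neg_one_iff cs ['}'] (n + 2) hnlen).mp he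
        have : '}' ∉ v := by
          rw [← hveq]
          exact fun hm => hnoc ((List.singleton_infix_iff _ _).mpr hm)
        rw [hscan, pv_grab_no_close v [] this, List.append_nil]
      · rw [if_neg he]
        obtain ⟨hle2, hpref2, hmin2⟩ :=
          PySem.Chars.findFrom_natCast_spec cs ['}'] (n + 2) hnlen he
        set e := PySem.Chars.findFrom cs ['}'] ((n + 2 : Nat) : Int) none with hee
        have he0 : (0 : Int) ≤ e := le_trans (Int.natCast_nonneg _) hle2
        set q := e.toNat with hq
        have heq : e = (q : Int) := (Int.toNat_of_nonneg he0).symm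
        have hn2q : n + 2 ≤ q := by
          have := hle2; rw [heq] at this; exact_mod_cast this
        obtain ⟨t, ht⟩ := hpref2
        have hqlen : q < cs.length := by
          rcases Nat.lt_or_ge q cs.length with h | h
          · exact h
          · rw [List.drop_eq_nil_of_le h] at ht; simp at ht
        have hteq : cs.drop (q + 1) = t := by
          have : (cs.drop q).drop 1 = t := by rw [← ht]; simp
          rwa [List.drop_drop] at this
        -- v = mseg ++ '}' :: t with '}' ∉ mseg
        have hqq : n + 2 + (q - (n + 2)) = q := by omega
        have hvdrop : v.drop (q - (n + 2)) = '}' :: t := by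
          rw [← hveq, List.drop_drop, hqq]
          simpa using ht.symm
        have hvdecomp : v = v.take (q - (n + 2)) ++ '}' :: t := by
          conv_lhs => rw [← List.take_append_drop (q - (n + 2)) v]
          rw [hvdrop]
        have hmnotin : '}' ∉ v.take (q - (n + 2)) := by
          intro hm
          obtain ⟨j, hjlt, hjeq⟩ := List.getElem_of_mem hm
          have hjlt' : j < q - (n + 2) := by
            have := hjlt; simp [List.length_take] at this; omega
          apply hmin2 (n + 2 + j) (by omega) (by omega)
          rw [pv_singleton_prefix, List.head?_drop]
          rw [List.getElem_take] at hjeq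
          have hjv : j < v.length := by omega
          rw [← List.getElem?_drop, hveq, List.getElem?_eq_getElem hjv, hjeq]
        -- the captured slice
        have hslice : PySem.Str.slice s (some ((n + 2 : Nat) : Int)) (some e)
            = String.ofList (v.take (q - (n + 2))) := by
          rw [heq]
          show String.ofList (PySem.Chars.slice cs (some ((n + 2 : Nat) : Int)) (some (q : Int))) = _
          rw [PySem.Chars.slice_eq_listSlice, PySem.List.slice_natCast, hveq]
        have hfin : e + 1 = ((q + 1 : Nat) : Int) := by rw [heq]; push_cast; ring
        have hgrab : pvGrab v [] = String.ofList (v.take (q - (n + 2))) :: pvScan false t := by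
          conv_lhs => rw [hvdecomp]
          rw [pv_grab_split _ _ [] hmnotin]
          simp
        rw [hslice, hfin, ih (q + 1) _ (by omega) (by omega), hteq, hscan, hgrab]
        simp

-- ===== VERDICT (by name: the statement is the Claim_ definition above) =====
theorem params_from_string_spec : Claim_equal_params_from_string := by
  intro s _
  unfold Spec_params_from_string params_from_string params_from_string_alt
  have hA := pv_foldA s s.toList [] [] false [] (by simp) (fun _ => rfl)
  simp only [List.length_nil, Int.natCast_zero, if_neg (by simp : ¬ (false = true)),
    List.getLast?_nil, List.nil_append] at hA
  have hB := pv_loopB s (s.toList.length + 1) 0 [] (by omega) (by omega)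
  simp only [List.drop_zero, List.nil_append, Int.natCast_zero] at hB
  rw [hA, hB]
  simp
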